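-- pv_equiv track=rewrite | github.com/QinyuanWu0710/memorize-then-generalize | evaluation/latent_knowledge_extractor/eic_lke_utils.py | insert_alternative_facts
-- ===== SOURCE A (Python) =====
-- def insert_alternative_facts(ref_names: list,
--                              ref_years: list,
--                              test_name_group: list,
--                              alternative_years: list,
--                              ref_num: int,
--                              prefix_num: int,
--                              inject_num: int):
--     # after 20 examples, insert alternative facts every 5 examples
--     # randomly choose one year from 1800 to 2000 as the alternative year
--     # inject (test_name, alternative_year) into the list every 5 examples
--     # store the inject index
--     inject_index = []
--     inject_names = []
--     inject_years = []
--     j=0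
--     seperate_num = (ref_num-prefix_num)//inject_num
--     for i in range(len(ref_names)):
--         if i >= prefix_num and i%seperate_num == 0:
--             inject_index.append(i)
--             #to make sure all the alternative facts have different head entities and tail entities in one sequence
--             inject_names.append(test_name_group[j])
--             inject_years.append(alternative_years[j])
--             j+=1
--         else:
--             inject_names.append(ref_names[i])
--             inject_years.append(ref_years[i])
--
--     return inject_names, inject_years, inject_index
-- ===== SOURCE B (Python) =====
-- def insert_alternative_facts(ref_names: list,
--                              ref_years: list,
--                              test_name_group: list,
--                              alternative_years: list,
--                              ref_num: int,
--                              prefix_num: int,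
--                              inject_num: int):
--     # Segment-based build: compute the inject positions, then assemble the
--     # output by concatenating the reference slices between consecutive inject
--     # positions with one alternative fact at each position.
--     n = len(ref_names)
--     seperate_num = (ref_num - prefix_num) // inject_num
--     inject_index = [i for i in range(n)
--                     if i >= prefix_num and i % seperate_num == 0]
--     inject_names = []
--     inject_years = []
--     prev = 0
--     for j, i in enumerate(inject_index):
--         inject_names += ref_names[prev:i]
--         inject_years += ref_years[prev:i]
--         inject_names.append(test_name_group[j])
--         inject_years.append(alternative_years[j])
--         prev = i + 1
--     inject_names += ref_names[prev:n]
--     inject_years += ref_years[prev:n]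
--     return inject_names, inject_years, inject_index
-- ===== Notes on version B (the rewrite author's own statement) =====
-- stated objective: alternative
-- what changed: B assembles the output segment-wise: it computes the inject positions up front, then concatenates the reference slices between consecutive inject positions with one alternative fact at each position, instead of A's single per-element pass that appends element-by-element under a condition while tracking a running counter; Pre_ excludes exactly the inputs on which A raises (ZeroDivisionError or IndexError).
import Mathlib
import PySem

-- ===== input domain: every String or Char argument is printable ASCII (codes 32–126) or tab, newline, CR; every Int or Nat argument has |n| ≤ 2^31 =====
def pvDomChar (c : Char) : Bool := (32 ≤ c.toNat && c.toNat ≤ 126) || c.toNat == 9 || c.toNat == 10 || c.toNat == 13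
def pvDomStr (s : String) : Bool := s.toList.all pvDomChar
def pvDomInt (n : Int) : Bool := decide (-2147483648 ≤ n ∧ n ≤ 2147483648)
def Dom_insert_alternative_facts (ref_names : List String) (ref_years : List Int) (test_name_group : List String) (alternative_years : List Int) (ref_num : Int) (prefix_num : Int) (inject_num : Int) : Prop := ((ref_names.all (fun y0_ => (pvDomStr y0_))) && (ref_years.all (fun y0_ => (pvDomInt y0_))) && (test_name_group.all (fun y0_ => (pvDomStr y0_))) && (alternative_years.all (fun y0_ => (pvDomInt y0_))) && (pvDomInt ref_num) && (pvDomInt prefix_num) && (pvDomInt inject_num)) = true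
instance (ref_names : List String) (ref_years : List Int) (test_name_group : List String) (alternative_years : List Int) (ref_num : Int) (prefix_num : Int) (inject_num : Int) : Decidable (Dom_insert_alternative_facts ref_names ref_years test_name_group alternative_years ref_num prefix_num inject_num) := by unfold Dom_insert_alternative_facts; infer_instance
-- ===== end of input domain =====

-- B replaces A's per-element conditional append by a segment build: compute the inject
-- positions, then concatenate the reference slices between consecutive positions with one
-- alternative fact at each position (alternative decomposition, same cost).

-- ===== PORT A =====
def insert_alternative_facts (ref_names : List String) (ref_years : List Int) (test_name_group : List String) (alternative_years : List Int) (ref_num : Int) (prefix_num : Int) (inject_num : Int) : List String × List Int × List Int :=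
  let seperate_num := PySem.Int.floordiv (ref_num - prefix_num) inject_num
  let st := (List.range ref_names.length).foldl
    (fun (st : List String × List Int × List Int × Int) (i : Nat) =>
      if (decide (prefix_num ≤ (i : Int)) && (PySem.Int.mod (i : Int) seperate_num == 0)) = true then
        (st.1 ++ [PySem.List.pyGetD test_name_group st.2.2.2 ""],
         st.2.1 ++ [PySem.List.pyGetD alternative_years st.2.2.2 0],
         st.2.2.1 ++ [(i : Int)],
         st.2.2.2 + 1)
      else
        (st.1 ++ [PySem.List.pyGetD ref_names (i : Int) ""],
         st.2.1 ++ [PySem.List.pyGetD ref_years (i : Int) 0],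
         st.2.2.1,
         st.2.2.2))
    (([] : List String), ([] : List Int), ([] : List Int), (0 : Int))
  (st.1, st.2.1, st.2.2.1)

-- ===== PORT B =====
-- B-side helper: the loop 'for j, i in enumerate(inject_index): … prev = i + 1';
-- the state is (prev, names, years); slices are exact via PySem.List.slice.
def pvSegLoop (rn : List String) (ry : List Int) (tng : List String) (ay : List Int) :
    List Int → Int → Int → List String × List Int → Int × List String × List Int
  | [], prev, _, st => (prev, st)
  | i :: rest, prev, j, st =>
      pvSegLoop rn ry tng ay rest (i + 1) (j + 1)
        (st.1 ++ PySem.List.slice rn (some prev) (some i) ++ [PySem.List.pyGetD tng j ""],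
         st.2 ++ PySem.List.slice ry (some prev) (some i) ++ [PySem.List.pyGetD ay j 0])

def insert_alternative_facts_alt (ref_names : List String) (ref_years : List Int) (test_name_group : List String) (alternative_years : List Int) (ref_num : Int) (prefix_num : Int) (inject_num : Int) : List String × List Int × List Int :=
  let n := ref_names.length
  let seperate_num := PySem.Int.floordiv (ref_num - prefix_num) inject_num
  let inject_index := ((List.range n).filter
      (fun (i : Nat) => decide (prefix_num ≤ (i : Int)) && (PySem.Int.mod (i : Int) seperate_num == 0))).map (fun (i : Nat) => (i : Int))
  let r := pvSegLoop ref_names ref_years test_name_group alternative_years inject_index 0 0 ([], [])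
  (r.2.1 ++ PySem.List.slice ref_names (some r.1) (some (n : Int)),
   r.2.2 ++ PySem.List.slice ref_years (some r.1) (some (n : Int)),
   inject_index)

-- ===== PRECONDITION & SPEC =====
-- Pre_ excludes exactly the inputs on which the Python A raises: inject_num == 0
-- (ZeroDivisionError); seperate_num == 0 while some loop index reaches the modulo
-- (ZeroDivisionError); too few test names / alternative years for the inject slots
-- (IndexError); a NON-inject index out of range of ref_years (IndexError).
def Pre_insert_alternative_facts (ref_names : List String) (ref_years : List Int) (test_name_group : List String) (alternative_years : List Int) (ref_num : Int) (prefix_num : Int) (inject_num : Int) : Prop :=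
  inject_num ≠ 0 ∧
  (PySem.Int.floordiv (ref_num - prefix_num) inject_num ≠ 0 ∨ ref_names = [] ∨ (ref_names.length : Int) ≤ prefix_num) ∧
  (∀ i ∈ List.range ref_names.length,
      (decide (prefix_num ≤ (i : Int)) && (PySem.Int.mod (i : Int) (PySem.Int.floordiv (ref_num - prefix_num) inject_num) == 0)) = false →
      i < ref_years.length) ∧
  ((List.range ref_names.length).countP
      (fun (i : Nat) => decide (prefix_num ≤ (i : Int)) && (PySem.Int.mod (i : Int) (PySem.Int.floordiv (ref_num - prefix_num) inject_num) == 0))) ≤ test_name_group.length ∧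
  ((List.range ref_names.length).countP
      (fun (i : Nat) => decide (prefix_num ≤ (i : Int)) && (PySem.Int.mod (i : Int) (PySem.Int.floordiv (ref_num - prefix_num) inject_num) == 0))) ≤ alternative_years.length
instance (ref_names : List String) (ref_years : List Int) (test_name_group : List String) (alternative_years : List Int) (ref_num : Int) (prefix_num : Int) (inject_num : Int) : Decidable (Pre_insert_alternative_facts ref_names ref_years test_name_group alternative_years ref_num prefix_num inject_num) := by unfold Pre_insert_alternative_facts; infer_instance

def pvWitness_insert_alternative_facts : List String × List Int × List String × List Int × Int × Int × Int :=
  (["a", "b", "c", "d"], [1, 2, 3, 4], ["X", "Y"], [9, 8], 4, 2, 2)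

def Spec_insert_alternative_facts (ref_names : List String) (ref_years : List Int) (test_name_group : List String) (alternative_years : List Int) (ref_num : Int) (prefix_num : Int) (inject_num : Int) (out : List String × List Int × List Int) : Prop := out = insert_alternative_facts_alt ref_names ref_years test_name_group alternative_years ref_num prefix_num inject_num
instance (ref_names : List String) (ref_years : List Int) (test_name_group : List String) (alternative_years : List Int) (ref_num : Int) (prefix_num : Int) (inject_num : Int) (out : List String × List Int × List Int) : Decidable (Spec_insert_alternative_facts ref_names ref_years test_name_group alternative_years ref_num prefix_num inject_num out) := by unfold Spec_insert_alternative_facts; infer_instance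

-- ===== CLAIM (what is proved, stated in full; the proofs are below) =====
def Claim_equal_insert_alternative_facts : Prop := ∀ (ref_names : List String) (ref_years : List Int) (test_name_group : List String) (alternative_years : List Int) (ref_num : Int) (prefix_num : Int) (inject_num : Int), Dom_insert_alternative_facts ref_names ref_years test_name_group alternative_years ref_num prefix_num inject_num → Pre_insert_alternative_facts ref_names ref_years test_name_group alternative_years ref_num prefix_num inject_num → Spec_insert_alternative_facts ref_names ref_years test_name_group alternative_years ref_num prefix_num inject_num (insert_alternative_facts ref_names ref_years test_name_group alternative_years ref_num prefix_num inject_num)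

-- ===== LEMMAS AND PROOFS =====

-- Unrolling the last slot of the segment loop.
theorem pvSegLoop_snoc (rn : List String) (ry : List Int) (tng : List String) (ay : List Int)
    (L : List Int) (i : Int) :
    ∀ (prev j : Int) (st : List String × List Int),
    pvSegLoop rn ry tng ay (L ++ [i]) prev j st =
      (i + 1,
       (pvSegLoop rn ry tng ay L prev j st).2.1
         ++ PySem.List.slice rn (some (pvSegLoop rn ry tng ay L prev j st).1) (some i)
         ++ [PySem.List.pyGetD tng (j + (L.length : Int)) ""],
       (pvSegLoop rn ry tng ay L prev j st).2.2
         ++ PySem.List.slice ry (some (pvSegLoop rn ry tng ay L prev j st).1) (some i)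
         ++ [PySem.List.pyGetD ay (j + (L.length : Int)) 0]) := by
  induction L with
  | nil => intro prev j st; simp [pvSegLoop]
  | cons x rest ih =>
      intro prev j st
      simp only [List.cons_append, pvSegLoop]
      rw [ih (x + 1) (j + 1) _]
      congr 2 <;> · congr 2; push_cast [List.length_cons]; ring

-- A's loop over range n computes B's segment build, for every prefix length n.
theorem loop_char (rn : List String) (ry : List Int) (tng : List String) (ay : List Int)
    (f : Nat → Bool) :
    ∀ n, n ≤ rn.length → (∀ i, i < n → f i = false → i < ry.length) →
    ∃ q : Nat, q ≤ n ∧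
      (pvSegLoop rn ry tng ay (((List.range n).filter f).map (fun (i : Nat) => (i : Int))) 0 0 ([], [])).1 = (q : Int) ∧
      (List.range n).foldl
        (fun (st : List String × List Int × List Int × Int) (i : Nat) =>
          if f i = true then
            (st.1 ++ [PySem.List.pyGetD tng st.2.2.2 ""],
             st.2.1 ++ [PySem.List.pyGetD ay st.2.2.2 0],
             st.2.2.1 ++ [(i : Int)],
             st.2.2.2 + 1)
          else
            (st.1 ++ [PySem.List.pyGetD rn (i : Int) ""],
             st.2.1 ++ [PySem.List.pyGetD ry (i : Int) 0],
             st.2.2.1,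
             st.2.2.2))
        (([] : List String), ([] : List Int), ([] : List Int), (0 : Int))
      = ((pvSegLoop rn ry tng ay (((List.range n).filter f).map (fun (i : Nat) => (i : Int))) 0 0 ([], [])).2.1
           ++ PySem.List.slice rn (some (q : Int)) (some (n : Int)),
         (pvSegLoop rn ry tng ay (((List.range n).filter f).map (fun (i : Nat) => (i : Int))) 0 0 ([], [])).2.2
           ++ PySem.List.slice ry (some (q : Int)) (some (n : Int)),
         ((List.range n).filter f).map (fun (i : Nat) => (i : Int)),
         (((List.range n).filter f).length : Int)) := by
  intro n
  induction n with
  | zero =>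
      intro _ _
      exact ⟨0, le_rfl, by simp [pvSegLoop], by simp [pvSegLoop, PySem.List.slice_to]⟩
  | succ n ih =>
      intro hn hY
      obtain ⟨q, hq, hprev, heq⟩ := ih (by omega) (fun i hi => hY i (by omega))
      have hn' : n < rn.length := by omega
      rw [List.range_succ, List.foldl_append, heq, List.foldl_cons, List.foldl_nil]
      simp only [List.filter_append, List.filter_singleton, Bool.cond_eq_ite, List.map_append]
      by_cases h : f n
      · -- inject step
        rw [if_pos h, if_pos h]
        simp only [List.map_singleton]
        rw [pvSegLoop_snoc]
        rw [hprev]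
        refine ⟨n + 1, le_rfl, by dsimp only; push_cast; ring, ?_⟩
        dsimp only
        have hempty : PySem.List.slice rn (some ((n + 1 : Nat) : Int)) (some ((n + 1 : Nat) : Int)) = [] := by
          rw [PySem.List.slice_natCast]; simp
        have hempty' : PySem.List.slice ry (some ((n + 1 : Nat) : Int)) (some ((n + 1 : Nat) : Int)) = [] := by
          rw [PySem.List.slice_natCast]; simp
        rw [hempty, hempty']
        simp only [List.append_nil, List.length_map, zero_add, List.append_assoc,
          List.length_append, List.length_singleton, Prod.mk.injEq]
        refine ⟨trivial, trivial, trivial, by push_cast; ring⟩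
      · -- copy step
        rw [if_neg h, if_neg h]
        simp only [List.map_nil, List.append_nil]
        refine ⟨q, by omega, hprev, ?_⟩
        have hy' : n < ry.length := hY n (by omega) (by simpa using h)
        have hsl : ∀ {α : Type} (xs : List α) (d : α), n < xs.length →
            PySem.List.slice xs (some (q : Int)) (some ((n + 1 : Nat) : Int))
              = PySem.List.slice xs (some (q : Int)) (some ((n : Nat) : Int)) ++ [PySem.List.pyGetD xs ((n : Nat) : Int) d] := by
          intro α xs d hx
          rw [PySem.List.slice_natCast, PySem.List.slice_natCast, PySem.List.pyGetD_natCast]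
          have h1 : n + 1 - q = (n - q) + 1 := by omega
          rw [h1, List.take_add_one]
          congr 1
          have h2 : (xs.drop q)[n - q]? = xs[n]? := by
            rw [List.getElem?_drop]; congr 1; omega
          rw [h2, List.getElem?_eq_getElem hx]
          simp [List.getD_eq_getElem?_getD, List.getElem?_eq_getElem hx]
        rw [hsl rn "" hn', hsl ry 0 hy']
        simp only [List.append_assoc]

-- ===== VERDICT (by name: the statement is the Claim_ definition above) =====
theorem insert_alternative_facts_spec : Claim_equal_insert_alternative_facts := by
  intro rn ry tng ay ref_num prefix_num inject_num _ hpre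
  unfold Spec_insert_alternative_facts insert_alternative_facts insert_alternative_facts_alt
  obtain ⟨-, -, hY, -, -⟩ := hpre
  obtain ⟨q, hq, hprev, heq⟩ := loop_char rn ry tng ay
    (fun (i : Nat) => decide (prefix_num ≤ (i : Int)) && (PySem.Int.mod (i : Int) (PySem.Int.floordiv (ref_num - prefix_num) inject_num) == 0))
    rn.length le_rfl (fun i hi hf => hY i (List.mem_range.mpr hi) hf)
  simp only at heq hprev ⊢
  rw [heq, hprev]
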